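-- pv_equiv track=rewrite | github.com/Salmoli-sys/Webscrapping_Fashion | na-kd2.py | parse_panel_text
-- ===== SOURCE A (Python) =====
-- def parse_panel_text(text):
--     """
--     Given innerText of a panel, group lines under headings ending with ':'.
--     """
--     lines = [l.strip() for l in text.splitlines() if l.strip()]
--     out, key = {}, None
--     for l in lines:
--         if l.endswith(":"):
--             key = l[:-1]
--             out[key] = []
--         elif key:
--             out[key].append(l)
--     return {k: "\n".join(v) for k, v in out.items()}
-- ===== SOURCE B (Python) =====
-- def parse_panel_text(text):
--     """
--     Given innerText of a panel, group lines under headings ending with ':'.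
--     Segment-consumption rewrite: skip the prologue, then repeatedly take one
--     heading and slice off its whole body before the next heading.
--     """
--     lines = [l.strip() for l in text.splitlines() if l.strip()]
--     out = {}
--     rest = lines
--     while rest and not rest[0].endswith(":"):
--         rest = rest[1:]
--     while rest:
--         key = rest[0][:-1]
--         body = []
--         rest = rest[1:]
--         while rest and not rest[0].endswith(":"):
--             body.append(rest[0])
--             rest = rest[1:]
--         out[key] = "\n".join(body)
--     return out
-- ===== Notes on version B (the rewrite author's own statement) =====
-- stated objective: alternative
-- what changed: Replaces A's running-key state machine (dict of lists appended line by line, joined at the end) with segment consumption: skip the prologue, then repeatedly take one heading and slice off its whole body up to the next heading, storing the joined string directly.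
-- intended difference: On texts whose last line equal to ':' is followed by a non-heading line, A returns '' for the empty-named heading (its 'elif key:' treats the empty key as no current heading and drops the body), while B returns the body joined with newlines, which is the intended grouping. — e.g. on parse_panel_text(":\ny"): A returns [("", "")], B returns [("", "y")]
import Mathlib
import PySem

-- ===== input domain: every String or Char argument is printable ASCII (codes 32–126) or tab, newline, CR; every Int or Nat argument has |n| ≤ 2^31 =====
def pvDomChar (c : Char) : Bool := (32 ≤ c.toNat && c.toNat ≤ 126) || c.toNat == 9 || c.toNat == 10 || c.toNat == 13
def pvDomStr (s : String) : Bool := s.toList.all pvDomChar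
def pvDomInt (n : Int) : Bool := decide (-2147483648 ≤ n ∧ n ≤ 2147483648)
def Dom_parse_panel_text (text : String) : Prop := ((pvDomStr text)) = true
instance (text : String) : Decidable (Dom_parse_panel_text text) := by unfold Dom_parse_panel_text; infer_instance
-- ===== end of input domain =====

-- B replaces A's running-key state machine by segment consumption (skip the prologue, then slice
-- off each heading's whole body); an alternative decomposition, same cost. On texts whose last
-- line ':' is followed by a non-heading line, A drops that body (see D_ below); B groups it under ''.

-- shared line preprocessing: [l.strip() for l in text.splitlines() if l.strip()]  (identical line in A and B)
def pvLines (text : String) : List String :=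
  ((PySem.Str.splitlines text).filter (fun l => PySem.Str.strip l != "")).map PySem.Str.strip

-- l.endswith(":")
def pvIsH (l : String) : Bool := PySem.Str.endswith l ":"

-- ===== PORT A =====
-- loop body of A: state = (out, key)
def pvStepA (st : PySem.Dict String (List String) × Option String) (l : String) :
    PySem.Dict String (List String) × Option String :=
  if pvIsH l then
    let k := PySem.Str.slice l none (some (-1))
    (st.1.insert k [], some k)
  else
    match st.2 with
    | some k => if k ≠ "" then (st.1.modify k [] (fun v => v ++ [l]), st.2) else st
    | none => st

def parse_panel_text (text : String) : List (String × String) :=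
  let lines := pvLines text
  let res := lines.foldl pvStepA (PySem.Dict.empty, none)
  res.1.items.map (fun kv => (kv.1, PySem.Str.join "\n" kv.2))

-- ===== PORT B =====
-- first while loop: drop lines until the first heading
def pvSkip : List String → List String
  | [] => []
  | l :: rest => if pvIsH l then l :: rest else pvSkip rest

-- inner while loop: (body, rest) = lines of the body, remainder from the next heading on
def pvInner : List String → List String × List String
  | [] => ([], [])
  | l :: rest =>
    if pvIsH l then ([], l :: rest)
    else
      let p := pvInner rest
      (l :: p.1, p.2)

theorem pvInner_snd_length_le : ∀ rest : List String, (pvInner rest).2.length ≤ rest.length := by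
  intro rest
  induction rest with
  | nil => simp [pvInner]
  | cons l r ih =>
    simp only [pvInner]
    split
    · simp
    · simpa using Nat.le_succ_of_le ih

-- outer while loop
def pvOuter : PySem.Dict String String → List String → PySem.Dict String String
  | out, [] => out
  | out, h :: rest =>
    let key := PySem.Str.slice h none (some (-1))
    let p := pvInner rest
    pvOuter (out.insert key (PySem.Str.join "\n" p.1)) p.2
  termination_by _ rest => rest.length
  decreasing_by exact Nat.lt_succ_of_le (pvInner_snd_length_le rest)

def parse_panel_text_alt (text : String) : List (String × String) :=
  (pvOuter PySem.Dict.empty (pvSkip (pvLines text))).items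

-- ===== PRECONDITION & SPEC =====
-- On texts whose LAST line equal to ':' is followed by a non-heading line, A returns '' for the
-- empty-named heading (its `elif key:` treats the empty key '' as "no current heading" and drops
-- the body lines), while B returns that body joined with '\n', the intended grouping.
def D_parse_panel_text (text : String) : Prop :=
  ":" ∈ pvLines text ∧
  ((((pvLines text).reverse.takeWhile (fun l => l != ":")).reverse).takeWhile
    (fun l => !pvIsH l)) ≠ []
instance (text : String) : Decidable (D_parse_panel_text text) := by
  unfold D_parse_panel_text; infer_instance

def Spec_parse_panel_text (text : String) (out : List (String × String)) : Prop :=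
  ¬ D_parse_panel_text text → out = parse_panel_text_alt text
instance (text : String) (out : List (String × String)) : Decidable (Spec_parse_panel_text text out) := by
  unfold Spec_parse_panel_text; infer_instance

def pvDiffWitness_parse_panel_text : String := ":\ny"
def pvDiffWitnessOut_parse_panel_text : (List (String × String)) × (List (String × String)) :=
  ([("", "")], [("", "y")])

-- ===== CLAIM (what is proved, stated in full; the proofs are below) =====
def Claim_unchanged_parse_panel_text : Prop :=
  ∀ (text : String), Dom_parse_panel_text text → Spec_parse_panel_text text (parse_panel_text text)
def Claim_changed_parse_panel_text : Prop :=
  Dom_parse_panel_text (pvDiffWitness_parse_panel_text) ∧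
  D_parse_panel_text (pvDiffWitness_parse_panel_text) ∧
  parse_panel_text (pvDiffWitness_parse_panel_text) = pvDiffWitnessOut_parse_panel_text.1 ∧
  parse_panel_text_alt (pvDiffWitness_parse_panel_text) = pvDiffWitnessOut_parse_panel_text.2 ∧
  pvDiffWitnessOut_parse_panel_text.1 ≠ pvDiffWitnessOut_parse_panel_text.2
def Claim_exact_parse_panel_text : Prop :=
  ∀ (text : String), Dom_parse_panel_text text → D_parse_panel_text text →
    parse_panel_text text ≠ parse_panel_text_alt text

-- ===== LEMMAS AND PROOFS =====

theorem pvInner_append : ∀ rest : List String, (pvInner rest).1 ++ (pvInner rest).2 = rest := by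
  intro rest
  induction rest with
  | nil => simp [pvInner]
  | cons l r ih =>
    simp only [pvInner]
    split
    · simp
    · simpa using ih

theorem pvInner_fst : ∀ rest : List String, (pvInner rest).1 = rest.takeWhile (fun l => !pvIsH l) := by
  intro rest
  induction rest with
  | nil => simp [pvInner]
  | cons l r ih =>
    simp only [pvInner, List.takeWhile]
    cases h : pvIsH l <;> simp [ih]

theorem pvInner_snd : ∀ rest : List String, (pvInner rest).2 = rest.dropWhile (fun l => !pvIsH l) := by
  intro rest
  induction rest with
  | nil => simp [pvInner]
  | cons l r ih =>
    simp only [pvInner, List.dropWhile]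
    cases h : pvIsH l <;> simp [ih]

theorem pvSkip_eq : ∀ ls : List String, pvSkip ls = ls.dropWhile (fun l => !pvIsH l) := by
  intro ls
  induction ls with
  | nil => simp [pvSkip]
  | cons l r ih =>
    simp only [pvSkip, List.dropWhile]
    cases h : pvIsH l <;> simp [ih]

-- block decomposition of a heading-headed line list: (key, body) per heading
def pvBlocks : List String → List (String × List String)
  | [] => []
  | h :: rest =>
    (PySem.Str.slice h none (some (-1)), (pvInner rest).1) :: pvBlocks (pvInner rest).2
  termination_by l => l.length
  decreasing_by exact Nat.lt_succ_of_le (pvInner_snd_length_le rest)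

def pvStepP (d : PySem.Dict String (List String)) (kb : String × List String) :
    PySem.Dict String (List String) :=
  d.insert kb.1 (if kb.1 = "" then [] else kb.2)

def pvStepJ (d : PySem.Dict String String) (kb : String × List String) :
    PySem.Dict String String :=
  d.insert kb.1 (PySem.Str.join "\n" kb.2)

def pvStepA' (d : PySem.Dict String String) (kb : String × List String) :
    PySem.Dict String String :=
  d.insert kb.1 (if kb.1 = "" then "" else PySem.Str.join "\n" kb.2)

theorem pvB_eq_aux : ∀ (n : Nat) (rest : List String), rest.length ≤ n →
    ∀ out, pvOuter out rest = (pvBlocks rest).foldl pvStepJ out := by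
  intro n
  induction n with
  | zero =>
    intro rest h out
    have : rest = [] := List.eq_nil_of_length_eq_zero (Nat.le_zero.1 h)
    subst this
    simp [pvOuter, pvBlocks]
  | succ n ih =>
    intro rest h out
    cases rest with
    | nil => simp [pvOuter, pvBlocks]
    | cons hd r =>
      simp only [pvOuter, pvBlocks, List.foldl_cons]
      exact ih _ (le_trans (pvInner_snd_length_le r) (Nat.succ_le_succ_iff.1 h)) _

theorem pvB_eq (rest : List String) (out : PySem.Dict String String) :
    pvOuter out rest = (pvBlocks rest).foldl pvStepJ out :=
  pvB_eq_aux rest.length rest le_rfl out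

theorem pv_modify_insert (d : PySem.Dict String (List String)) (k : String)
    (v d0 : List String) (f : List String → List String) :
    (d.insert k v).modify k d0 f = d.insert k (f v) := by
  simp [PySem.Dict.modify, PySem.Dict.getD_insert_self, PySem.Dict.insert_insert_self]

theorem pvA_some : ∀ (rest : List String) (d : PySem.Dict String (List String)) (k : String)
    (acc : List String),
    (List.foldl pvStepA (d.insert k acc, some k) rest).1 =
      (pvBlocks (pvInner rest).2).foldl pvStepP
        (d.insert k (if k = "" then acc else acc ++ (pvInner rest).1)) := by
  intro rest
  induction rest with
  | nil =>
    intro d k acc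
    simp [pvInner, pvBlocks, ite_self]
  | cons l r ih =>
    intro d k acc
    by_cases hl : pvIsH l = true
    · -- heading: new key, fresh accumulator
      simp only [pvInner, hl, if_pos, List.foldl_cons]
      rw [show pvStepA (d.insert k acc, some k) l
          = ((d.insert k acc).insert (PySem.Str.slice l none (some (-1))) [],
             some (PySem.Str.slice l none (some (-1)))) from by simp [pvStepA, hl]]
      rw [ih (d.insert k acc) _ []]
      simp only [pvBlocks, List.foldl_cons]
      rw [show ∀ dd, pvStepP dd (PySem.Str.slice l none (some (-1)), (pvInner r).1)
          = dd.insert (PySem.Str.slice l none (some (-1)))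
              (if PySem.Str.slice l none (some (-1)) = "" then [] else (pvInner r).1)
          from fun dd => rfl]
      congr 1
      split <;> simp
    · -- body line: appended if the key is nonempty, dropped otherwise
      simp only [pvInner, hl, if_neg, Bool.not_eq_true, List.foldl_cons]
      by_cases hk : k = ""
      · subst hk
        rw [show pvStepA (d.insert "" acc, some "") l = (d.insert "" acc, some "") from by
          simp [pvStepA, hl]]
        rw [ih d "" acc]
        simp
      · rw [show pvStepA (d.insert k acc, some k) l
            = ((d.insert k acc).modify k [] (fun v => v ++ [l]), some k) from by
          simp [pvStepA, hl, hk]]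
        rw [pv_modify_insert]
        rw [ih d k (acc ++ [l])]
        simp [hk]
  
theorem pvA_none : ∀ (lines : List String) (d : PySem.Dict String (List String)),
    (List.foldl pvStepA (d, none) lines).1 = (pvBlocks (pvSkip lines)).foldl pvStepP d := by
  intro lines
  induction lines with
  | nil => simp [pvSkip, pvBlocks]
  | cons l r ih =>
    intro d
    by_cases hl : pvIsH l = true
    · simp only [pvSkip, hl, if_pos, List.foldl_cons]
      rw [show pvStepA (d, none) l
          = (d.insert (PySem.Str.slice l none (some (-1))) [],
             some (PySem.Str.slice l none (some (-1)))) from by simp [pvStepA, hl]]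
      rw [pvA_some r d _ []]
      simp only [pvBlocks, List.foldl_cons]
      rw [show pvStepP d (PySem.Str.slice l none (some (-1)), (pvInner r).1)
          = d.insert (PySem.Str.slice l none (some (-1)))
              (if PySem.Str.slice l none (some (-1)) = "" then [] else (pvInner r).1) from rfl]
      congr 1
    · simp only [pvSkip, hl, if_neg, Bool.not_eq_true, List.foldl_cons]
      rw [show pvStepA (d, none) l = (d, none) from by simp [pvStepA, hl]]
      exact ih d

-- value-map from the list-dict to the string-dict
def pvF (kv : String × List String) : String × String := (kv.1, PySem.Str.join "\n" kv.2)
def pvJ (d : PySem.Dict String (List String)) : PySem.Dict String String :=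
  PySem.Dict.mk (d.items.map pvF)

theorem pvJ_insert (d : PySem.Dict String (List String)) (k : String) (v : List String) :
    pvJ (d.insert k v) = (pvJ d).insert k (PySem.Str.join "\n" v) := by
  have hfc : ((fun p : String × String => p.1 == k) ∘ pvF) = (fun p : String × List String => p.1 == k) := by
    funext p; simp [pvF]
  have hc : (pvJ d).contains k = d.contains k := by
    simp only [pvJ, PySem.Dict.contains, List.any_map, hfc]
  apply PySem.Dict.ext
  by_cases h : d.contains k = true
  · rw [show (pvJ (d.insert k v)).items = (d.insert k v).items.map pvF from rfl]
    rw [show ((pvJ d).insert k (PySem.Str.join "\n" v)).items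
        = if (pvJ d).contains k = true then (pvJ d).items.map
            (fun p => if p.1 == k then (k, PySem.Str.join "\n" v) else p)
          else (pvJ d).items ++ [(k, PySem.Str.join "\n" v)] from by
      unfold PySem.Dict.insert; split <;> rfl]
    rw [hc, if_pos h]
    rw [show (d.insert k v).items
        = List.map (fun p => if (p.1 == k) = true then (k, v) else p) d.items from by
      simp [PySem.Dict.insert, h]]
    rw [show (pvJ d).items = d.items.map pvF from rfl]
    simp only [List.map_map]
    apply List.map_congr_left
    intro p _
    by_cases hp : p.1 = k <;> simp [pvF, hp]
  · rw [show (pvJ (d.insert k v)).items = (d.insert k v).items.map pvF from rfl]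
    rw [show ((pvJ d).insert k (PySem.Str.join "\n" v)).items
        = if (pvJ d).contains k = true then (pvJ d).items.map
            (fun p => if p.1 == k then (k, PySem.Str.join "\n" v) else p)
          else (pvJ d).items ++ [(k, PySem.Str.join "\n" v)] from by
      unfold PySem.Dict.insert; split <;> rfl]
    rw [hc, if_neg h]
    rw [show (d.insert k v).items = d.items ++ [(k, v)] from by simp [PySem.Dict.insert, h]]
    simp [pvJ, pvF]

theorem pvJA : ∀ (bs : List (String × List String)) (d : PySem.Dict String (List String)),
    pvJ (bs.foldl pvStepP d) = bs.foldl pvStepA' (pvJ d) := by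
  intro bs
  induction bs with
  | nil => simp
  | cons kb t ih =>
    intro d
    simp only [List.foldl_cons]
    rw [show pvStepP d kb = d.insert kb.1 (if kb.1 = "" then [] else kb.2) from rfl, ih,
        pvJ_insert]
    congr 1
    by_cases hk : kb.1 = "" <;> simp [pvStepA', hk, show PySem.Str.join "\n" ([] : List String) = "" from by decide]

theorem pv_get?_foldl {α V : Type} (f : α → String) (v : α → V) :
    ∀ (bs : List α) (d : PySem.Dict String V) (k : String),
    (bs.foldl (fun d a => d.insert (f a) (v a)) d).get? k =
      ((bs.filter (fun a => f a == k)).getLast?).elim (d.get? k) (fun a => some (v a)) := by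
  intro bs
  induction bs using List.reverseRecOn with
  | nil => simp
  | append_singleton xs x ih =>
    intro d k
    rw [List.foldl_append, List.filter_append]
    simp only [List.foldl_cons, List.foldl_nil, List.filter]
    by_cases h : f x = k
    · simp [h, PySem.Dict.get?_insert_self]
    · have hbe : (f x == k) = false := by simp [h]
      rw [hbe]
      simp only [List.getLast?_append, List.getLast?_nil]
      rw [PySem.Dict.get?_insert_of_ne _ _ (fun hkk => h hkk.symm)]
      exact ih d k

theorem pv_dict_eq (d1 d2 : PySem.Dict String String)
    (hk : d1.keys = d2.keys) (hn : d1.keys.Nodup)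
    (hg : ∀ k, d1.get? k = d2.get? k) : d1 = d2 := by
  apply PySem.Dict.ext
  rw [PySem.Dict.items_eq_map_keys d1 hn "", PySem.Dict.items_eq_map_keys d2 (hk ▸ hn) "", hk]
  apply List.map_congr_left
  intro k _
  simp [PySem.Dict.getD_eq_get?_getD, hg k]

theorem pv_head?_dropWhile (p : String → Bool) :
    ∀ (l : List String) (x : String), (l.dropWhile p).head? = some x → p x = false := by
  intro l
  induction l with
  | nil => simp
  | cons a t ih =>
    intro x
    simp only [List.dropWhile]
    cases h : p a
    · intro hx; simp at hx; subst hx; exact h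
    · exact ih x

theorem pv_takeWhile_append_of_all (p : String → Bool) (xs ys : List String)
    (h : ∀ x ∈ xs, p x = true) :
    (xs ++ ys).takeWhile p = xs ++ ys.takeWhile p := by
  rw [List.takeWhile_append, if_pos]
  rw [List.takeWhile_eq_self_iff.2 h]

theorem pv_takeWhile_append_of_ex (p : String → Bool) (xs ys : List String)
    (x : String) (hx : x ∈ xs) (hpx : p x = false) :
    (xs ++ ys).takeWhile p = xs.takeWhile p := by
  rw [List.takeWhile_append, if_neg]
  intro hlen
  have heq := (List.takeWhile_prefix p (l := xs)).eq_of_length hlen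
  have := List.takeWhile_eq_self_iff.1 heq x hx
  simp [hpx] at this

theorem pvKey_empty {h : String} (hH : pvIsH h = true)
    (hk : PySem.Str.slice h none (some (-1)) = "") : h = ":" := by
  have h1 : h.toList.dropLast = [] := by
    have h2 := congrArg String.toList hk
    rwa [PySem.Str.slice_to_neg_one] at h2
  have h3 : [':'] <:+ h.toList := by
    have h4 : PySem.Chars.endswith h.toList [':'] = true := by
      simpa [pvIsH] using hH
    exact (PySem.Chars.endswith_iff _ _).1 h4
  have h5 : h.toList = [':'] := by
    rcases h3 with ⟨u, hu⟩
    have e1 := congrArg List.length hu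
    have e2 := congrArg List.length h1
    rw [List.length_dropLast] at e2
    simp at e1 e2
    have hu0 : u = [] := List.eq_nil_of_length_eq_zero (by omega)
    simpa [hu0] using hu.symm
  rw [← String.ofList_toList (s := h), h5]

theorem pvNOC_aux : ∀ (n : Nat) (rest : List String), rest.length ≤ n → ":" ∉ rest →
    (∀ x, rest.head? = some x → pvIsH x = true) →
    (pvBlocks rest).filter (fun kb => kb.1 == "") = [] := by
  intro n
  induction n with
  | zero =>
    intro rest h _ _
    have : rest = [] := List.eq_nil_of_length_eq_zero (Nat.le_zero.1 h)
    subst this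
    simp [pvBlocks]
  | succ n ih =>
    intro rest h hmem hh
    cases rest with
    | nil => simp [pvBlocks]
    | cons hd r =>
      have hhd : pvIsH hd = true := hh hd rfl
      have hkey : ¬ (PySem.Str.slice hd none (some (-1)) = "") := by
        intro heq
        exact hmem (by rw [← pvKey_empty hhd heq]; exact List.mem_cons_self)
      simp only [pvBlocks, List.filter_cons]
      rw [if_neg (by simpa using hkey)]
      apply ih
      · exact le_trans (pvInner_snd_length_le r) (Nat.succ_le_succ_iff.1 h)
      · intro hin
        rw [pvInner_snd] at hin
        exact hmem (List.mem_cons_of_mem _ ((List.dropWhile_sublist _).subset hin))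
      · intro x hx
        rw [pvInner_snd] at hx
        have := pv_head?_dropWhile _ r x hx
        simpa using this

theorem pvNOC (rest : List String) (h1 : ":" ∉ rest)
    (h2 : ∀ x, rest.head? = some x → pvIsH x = true) :
    (pvBlocks rest).filter (fun kb => kb.1 == "") = [] :=
  pvNOC_aux rest.length rest le_rfl h1 h2

-- the lines after the last ':' line
def pvS (ls : List String) : List String := (ls.reverse.takeWhile (fun l => l != ":")).reverse

theorem pvS_append (u v : List String) (hm : ":" ∈ v) : pvS (u ++ v) = pvS v := by
  unfold pvS
  rw [List.reverse_append,
    pv_takeWhile_append_of_ex _ _ _ ":" (List.mem_reverse.2 hm) (by simp)]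

theorem pvCHAR_aux : ∀ (n : Nat) (lines : List String), lines.length ≤ n → ":" ∈ lines →
    ((pvBlocks (pvSkip lines)).filter (fun kb => kb.1 == "")).getLast? =
      some ("", (pvS lines).takeWhile (fun l => !pvIsH l)) := by
  intro n
  induction n with
  | zero =>
    intro lines h hm
    have : lines = [] := List.eq_nil_of_length_eq_zero (Nat.le_zero.1 h)
    subst this
    simp at hm
  | succ n ih =>
    intro lines h hm
    cases lines with
    | nil => simp at hm
    | cons l r =>
      by_cases hl : pvIsH l = true
      · rw [show pvSkip (l :: r) = l :: r from by simp [pvSkip, hl]]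
        by_cases hm2 : ":" ∈ (pvInner r).2
        · have hr2len : (pvInner r).2.length ≤ n :=
            le_trans (pvInner_snd_length_le r) (Nat.succ_le_succ_iff.1 h)
          have hskip : pvSkip (pvInner r).2 = (pvInner r).2 := by
            cases h2 : (pvInner r).2 with
            | nil => simp [pvSkip]
            | cons a t =>
              have ha : pvIsH a = true := by
                have := pv_head?_dropWhile (fun s => !pvIsH s) r a
                  (by rw [← pvInner_snd, h2]; rfl)
                simpa using this
              simp [pvSkip, ha]
          have IH := ih (pvInner r).2 hr2len hm2
          rw [hskip] at IH
          have hSeq : pvS (l :: r) = pvS (pvInner r).2 := by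
            rw [show l :: r = (l :: (pvInner r).1) ++ (pvInner r).2 from by
              rw [List.cons_append, pvInner_append], pvS_append _ _ hm2]
          rw [hSeq]
          simp only [pvBlocks, List.filter_cons]
          split
          · cases hx : (pvBlocks (pvInner r).2).filter (fun kb => kb.1 == "") with
            | nil => rw [hx] at IH; simp at IH
            | cons a t =>
              rw [hx] at IH
              rw [List.getLast?_cons_cons]
              exact IH
          · exact IH
        · have hb1 : ":" ∉ (pvInner r).1 := by
            rw [pvInner_fst]
            intro hmem
            have hp := List.mem_takeWhile_imp hmem
            simp [pvIsH] at hp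
            exact absurd hp (by decide)
          have hl' : l = ":" := by
            rcases List.mem_cons.1 hm with he | hin
            · exact he.symm
            · exfalso
              rw [← pvInner_append r] at hin
              rcases List.mem_append.1 hin with h1 | h2
              · exact hb1 h1
              · exact hm2 h2
          subst hl'
          have hrr : ":" ∉ r := by
            rw [← pvInner_append r]
            intro hin
            rcases List.mem_append.1 hin with h1 | h2
            · exact hb1 h1
            · exact hm2 h2
          have hnoc : (pvBlocks (pvInner r).2).filter (fun kb => kb.1 == "") = [] := by
            apply pvNOC _ ?notin ?hd
            case notin =>
              intro hin
              rw [pvInner_snd] at hin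
              exact hrr ((List.dropWhile_sublist _).subset hin)
            case hd =>
              intro x hx
              rw [pvInner_snd] at hx
              have := pv_head?_dropWhile (fun s => !pvIsH s) r x hx
              simpa using this
          simp only [pvBlocks, List.filter_cons]
          rw [if_pos (by decide), hnoc]
          have hSv : pvS (":" :: r) = r := by
            unfold pvS
            rw [List.reverse_cons,
              pv_takeWhile_append_of_all _ _ _ (by
                intro x hx
                have : x ≠ ":" := fun he => hrr (List.mem_reverse.1 (he ▸ hx))
                simpa using this)]
            simp
          rw [hSv, ← pvInner_fst]
          rfl
      · have hlne : l ≠ ":" := fun he => by rw [he] at hl; exact hl (by decide)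
        have hmr : ":" ∈ r := by
          rcases List.mem_cons.1 hm with he | hin
          · exact absurd he.symm hlne
          · exact hin
        rw [show pvSkip (l :: r) = pvSkip r from by simp [pvSkip, hl]]
        rw [show pvS (l :: r) = pvS r from by
          rw [show l :: r = [l] ++ r from rfl]; exact pvS_append [l] r hmr]
        exact ih r (Nat.succ_le_succ_iff.1 h) hmr

theorem pvCHAR (lines : List String) (hm : ":" ∈ lines) :
    ((pvBlocks (pvSkip lines)).filter (fun kb => kb.1 == "")).getLast? =
      some ("", ((lines.reverse.takeWhile (fun l => l != ":")).reverse).takeWhile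
        (fun l => !pvIsH l)) :=
  pvCHAR_aux lines.length lines le_rfl hm

-- ===== VERDICT (by name: the statement is the Claim_ definition above) =====
theorem pv_skip_no_colon (lines : List String) (h : ":" ∉ lines) : ":" ∉ pvSkip lines := by
  rw [pvSkip_eq]
  intro hin
  exact h ((List.dropWhile_sublist _).subset hin)

theorem pv_skip_head (lines : List String) :
    ∀ x, (pvSkip lines).head? = some x → pvIsH x = true := by
  intro x hx
  rw [pvSkip_eq] at hx
  have := pv_head?_dropWhile (fun s => !pvIsH s) lines x hx
  simpa using this

theorem pv_red_A (text : String) : parse_panel_text text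
    = ((pvBlocks (pvSkip (pvLines text))).foldl pvStepA' PySem.Dict.empty).items := by
  show ((pvLines text).foldl pvStepA (PySem.Dict.empty, none)).1.items.map
      (fun kv => (kv.1, PySem.Str.join "\n" kv.2)) = _
  rw [show (fun kv : String × List String => (kv.1, PySem.Str.join "\n" kv.2)) = pvF from rfl]
  rw [show ((pvLines text).foldl pvStepA (PySem.Dict.empty, none)).1.items.map pvF
      = (pvJ ((pvLines text).foldl pvStepA (PySem.Dict.empty, none)).1).items from rfl]
  rw [pvA_none, pvJA]
  rfl

theorem pv_red_B (text : String) : parse_panel_text_alt text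
    = ((pvBlocks (pvSkip (pvLines text))).foldl pvStepJ PySem.Dict.empty).items := by
  show (pvOuter PySem.Dict.empty (pvSkip (pvLines text))).items = _
  rw [pvB_eq]

theorem pv_getA (text : String) (k : String) :
    ((pvBlocks (pvSkip (pvLines text))).foldl pvStepA' PySem.Dict.empty).get? k =
      (((pvBlocks (pvSkip (pvLines text))).filter (fun a => a.1 == k)).getLast?).elim
        none (fun a => some (if a.1 = "" then "" else PySem.Str.join "\n" a.2)) := by
  rw [show ((pvBlocks (pvSkip (pvLines text))).foldl pvStepA' PySem.Dict.empty)
      = ((pvBlocks (pvSkip (pvLines text))).foldl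
          (fun d a => d.insert a.1 (if a.1 = "" then "" else PySem.Str.join "\n" a.2))
          PySem.Dict.empty) from rfl]
  rw [pv_get?_foldl (fun a : String × List String => a.1)
        (fun a => if a.1 = "" then "" else PySem.Str.join "\n" a.2)]
  rfl

theorem pv_getB (text : String) (k : String) :
    ((pvBlocks (pvSkip (pvLines text))).foldl pvStepJ PySem.Dict.empty).get? k =
      (((pvBlocks (pvSkip (pvLines text))).filter (fun a => a.1 == k)).getLast?).elim
        none (fun a => some (PySem.Str.join "\n" a.2)) := by
  rw [show ((pvBlocks (pvSkip (pvLines text))).foldl pvStepJ PySem.Dict.empty)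
      = ((pvBlocks (pvSkip (pvLines text))).foldl
          (fun d a => d.insert a.1 (PySem.Str.join "\n" a.2)) PySem.Dict.empty) from rfl]
  rw [pv_get?_foldl (fun a : String × List String => a.1)
        (fun a => PySem.Str.join "\n" a.2)]
  rfl

theorem parse_panel_text_spec : Claim_unchanged_parse_panel_text := by
  intro text _ hnD
  show parse_panel_text text = parse_panel_text_alt text
  rw [pv_red_A, pv_red_B]
  congr 1
  apply pv_dict_eq
  · show ((pvBlocks (pvSkip (pvLines text))).foldl
        (fun d kb => d.insert kb.1 (if kb.1 = "" then "" else PySem.Str.join "\n" kb.2))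
        PySem.Dict.empty).keys
      = ((pvBlocks (pvSkip (pvLines text))).foldl
        (fun d kb => d.insert kb.1 (PySem.Str.join "\n" kb.2)) PySem.Dict.empty).keys
    rw [PySem.Dict.keys_foldl_insert_key, PySem.Dict.keys_foldl_insert_key]
  · show ((pvBlocks (pvSkip (pvLines text))).foldl
        (fun d kb => d.insert kb.1 (if kb.1 = "" then "" else PySem.Str.join "\n" kb.2))
        PySem.Dict.empty).keys.Nodup
    apply PySem.Dict.nodup_keys_foldl_insert_key
    simp [PySem.Dict.empty, PySem.Dict.keys]
  · intro k
    rw [pv_getA, pv_getB]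
    cases hL : ((pvBlocks (pvSkip (pvLines text))).filter (fun a => a.1 == k)).getLast? with
    | none => simp
    | some a =>
      simp only [Option.elim]
      have ha : a ∈ (pvBlocks (pvSkip (pvLines text))).filter (fun a => a.1 == k) :=
        List.mem_of_getLast? hL
      have hak : a.1 = k := by simpa using (List.mem_filter.1 ha).2
      by_cases hk : k = ""
      · subst hk
        by_cases hmm : ":" ∈ pvLines text
        · have hchar := pvCHAR (pvLines text) hmm
          rw [hL] at hchar
          have haT := Option.some.inj hchar
          have hT : (((pvLines text).reverse.takeWhile (fun l => l != ":")).reverse).takeWhile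
              (fun l => !pvIsH l) = [] := by
            by_contra hne
            exact hnD ⟨hmm, hne⟩
          rw [haT, hT]
          simp [show PySem.Str.join "\n" ([] : List String) = "" from by decide]
        · exfalso
          have hnoc := pvNOC (pvSkip (pvLines text)) (pv_skip_no_colon _ hmm)
            (pv_skip_head _)
          rw [hnoc] at hL
          simp at hL
      · simp [hak, hk]

theorem parse_panel_text_changed : Claim_changed_parse_panel_text := by
  unfold Claim_changed_parse_panel_text
  refine ⟨by decide, by decide, by decide, ?_, by decide⟩
  show (pvOuter PySem.Dict.empty (pvSkip (pvLines pvDiffWitness_parse_panel_text))).items = _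
  rw [show pvSkip (pvLines pvDiffWitness_parse_panel_text) = [":", "y"] from by decide]
  rw [pvOuter, show pvInner ["y"] = (["y"], []) from by decide, pvOuter]
  decide

theorem parse_panel_text_tight : Claim_exact_parse_panel_text := by
  intro text _ hD heq
  obtain ⟨hm, hne⟩ := hD
  rw [pv_red_A, pv_red_B] at heq
  have hdeq : ((pvBlocks (pvSkip (pvLines text))).foldl pvStepA' PySem.Dict.empty)
      = ((pvBlocks (pvSkip (pvLines text))).foldl pvStepJ PySem.Dict.empty) :=
    PySem.Dict.ext heq
  have hchar := pvCHAR (pvLines text) hm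
  have hg1 : ((pvBlocks (pvSkip (pvLines text))).foldl pvStepA' PySem.Dict.empty).get? ""
      = some "" := by
    rw [pv_getA, hchar]
    rfl
  have hg2 : ((pvBlocks (pvSkip (pvLines text))).foldl pvStepJ PySem.Dict.empty).get? ""
      = some (PySem.Str.join "\n"
          ((((pvLines text).reverse.takeWhile (fun l => l != ":")).reverse).takeWhile
            (fun l => !pvIsH l))) := by
    rw [pv_getB, hchar]
    rfl
  rw [hdeq, hg2] at hg1
  have hjoin := Option.some.inj hg1
  cases hT : (((pvLines text).reverse.takeWhile (fun l => l != ":")).reverse).takeWhile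
      (fun l => !pvIsH l) with
  | nil => exact hne hT
  | cons x xs =>
    rw [hT] at hjoin
    have hxl : x ∈ pvLines text := by
      have h1 : x ∈ (((pvLines text).reverse.takeWhile (fun l => l != ":")).reverse) := by
        have := List.mem_cons_self (a := x) (l := xs)
        rw [← hT] at this
        exact (List.takeWhile_sublist _).subset this
      have h2 := List.mem_reverse.1 h1
      have h3 := (List.takeWhile_sublist _).subset h2
      exact List.mem_reverse.1 h3
    have hxne : x ≠ "" := by
      unfold pvLines at hxl
      rcases List.mem_map.1 hxl with ⟨l, hl, rfl⟩
      have := (List.mem_filter.1 hl).2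
      simpa using this
    -- a nonempty joined body of nonempty lines is a nonempty string
    have hxlist : x.toList ≠ [] := by
      intro h0
      exact hxne (by rw [← String.ofList_toList (s := x), h0])
    have h0 := congrArg String.toList hjoin.symm
    rw [PySem.Str.toList_join] at h0
    cases xs with
    | nil =>
      rw [show List.map String.toList [x] = [x.toList] from rfl,
        PySem.Chars.join_singleton] at h0
      exact hxlist (by simpa using h0)
    | cons y ys =>
      rw [show List.map String.toList (x :: y :: ys)
          = x.toList :: y.toList :: ys.map String.toList from rfl,
        PySem.Chars.join_cons_cons] at h0
      have hlen := congrArg List.length h0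
      rw [List.length_append, List.length_append] at hlen
      simp at hlen
      omega
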